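-- pv_equiv track=rewrite | github.com/Sashayerty/SmartStudy | main.py | normal_function
-- ===== SOURCE A (Python) =====
-- def normal_function(function: str):
--     flag = False
--     li = []
--     for i in function:
--         if flag:
--             li.append(i)
--         if i == '=':
--             flag = True
--     doing = ''.join(li)
--     return doing
-- ===== SOURCE B (Python) =====
-- def normal_function(function: str):
--     idx = function.find('=')
--     return '' if idx == -1 else function[idx + 1:]
-- ===== Notes on version B (the rewrite author's own statement) =====
-- stated objective: simpler
-- what changed: B computes the position of the first '=' with str.find and returns one slice, instead of A's char-by-char loop with a flag that appends the remaining characters into a list and joins them.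
import Mathlib
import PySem

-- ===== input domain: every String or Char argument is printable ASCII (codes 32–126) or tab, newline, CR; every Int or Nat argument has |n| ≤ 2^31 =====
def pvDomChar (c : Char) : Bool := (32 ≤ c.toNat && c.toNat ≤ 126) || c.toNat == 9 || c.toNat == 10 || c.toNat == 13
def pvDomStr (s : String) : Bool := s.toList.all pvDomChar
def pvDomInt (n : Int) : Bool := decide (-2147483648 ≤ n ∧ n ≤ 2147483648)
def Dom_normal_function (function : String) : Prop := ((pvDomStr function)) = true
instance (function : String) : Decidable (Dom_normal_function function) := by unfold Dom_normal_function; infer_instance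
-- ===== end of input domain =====

-- B computes the position of the first '=' with str.find and returns one slice,
-- instead of A's char-by-char loop with a flag accumulating characters into a list (simpler).


-- ===== PORT A =====
-- the loop body: if flag: li.append(i); if i == '=': flag = True
def pvStepA (st : Bool × List Char) (i : Char) : Bool × List Char :=
  let li := if st.1 then st.2 ++ [i] else st.2
  let flag := if i = '=' then true else st.1
  (flag, li)

-- flag = False; li = []; for i in function: …; return ''.join(li)
def normal_function (function : String) : String :=
  let st := function.toList.foldl pvStepA (false, [])
  String.ofList st.2

-- ===== PORT B =====
-- idx = function.find('='); return '' if idx == -1 else function[idx + 1:]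
def normal_function_alt (function : String) : String :=
  let idx := PySem.Str.find function "="
  if idx = -1 then "" else PySem.Str.slice function (some (idx + 1)) none

-- ===== PRECONDITION & SPEC =====
def Spec_normal_function (function : String) (out : String) : Prop := out = normal_function_alt function
instance (function : String) (out : String) : Decidable (Spec_normal_function function out) := by unfold Spec_normal_function; infer_instance

-- ===== CLAIM (what is proved, stated in full; the proofs are below) =====
def Claim_equal_normal_function : Prop := ∀ (function : String), Dom_normal_function function → Spec_normal_function function (normal_function function)

-- ===== LEMMAS AND PROOFS =====

-- the characters A emits: everything after the first '='
def pvAfterEq : List Char → List Char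
  | [] => []
  | c :: rest => if c = '=' then rest else pvAfterEq rest

theorem pvFoldA_true (cs li : List Char) :
    cs.foldl pvStepA (true, li) = (true, li ++ cs) := by
  induction cs generalizing li with
  | nil => simp
  | cons c rest ih => simp [List.foldl, pvStepA, ih]

theorem pvFoldA_false (cs li : List Char) :
    (cs.foldl pvStepA (false, li)).2 = li ++ pvAfterEq cs := by
  induction cs generalizing li with
  | nil => simp [pvAfterEq]
  | cons c rest ih =>
    by_cases h : c = '='
    · simp [List.foldl, pvStepA, h, pvAfterEq, pvFoldA_true]
    · simp [List.foldl, pvStepA, h, pvAfterEq, ih]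

theorem pvAfterEq_of_not_mem (cs : List Char) (h : '=' ∉ cs) : pvAfterEq cs = [] := by
  induction cs with
  | nil => rfl
  | cons c rest ih =>
    simp only [List.mem_cons, not_or] at h
    simp [pvAfterEq, Ne.symm h.1, ih h.2]

theorem pvAfterEq_of_first (cs : List Char) (j : Nat) (hj : cs[j]? = some '=')
    (hmin : ∀ i < j, cs[i]? ≠ some '=') : pvAfterEq cs = cs.drop (j + 1) := by
  induction cs generalizing j with
  | nil => simp at hj
  | cons c rest ih =>
    cases j with
    | zero =>
      simp at hj
      simp [pvAfterEq, hj]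
    | succ k =>
      have hc : c ≠ '=' := by
        have := hmin 0 (Nat.succ_pos k)
        simpa using this
      simp only [List.getElem?_cons_succ] at hj
      have hrest : pvAfterEq rest = rest.drop (k + 1) := by
        refine ih k hj ?_
        intro i hi
        have := hmin (i + 1) (by omega)
        simpa using this
      simp [pvAfterEq, hc, hrest]

theorem pvSingleton_prefix_drop (cs : List Char) (j : Nat) :
    ['='] <+: cs.drop j ↔ cs[j]? = some '=' := by
  constructor
  · rintro ⟨t, ht⟩
    have h0 : (cs.drop j)[0]? = some '=' := by rw [← ht]; rfl
    simpa [List.getElem?_drop] using h0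
  · intro h
    have h0 : (cs.drop j)[0]? = some '=' := by simpa [List.getElem?_drop] using h
    cases hd : cs.drop j with
    | nil => simp [hd] at h0
    | cons x xs =>
      rw [hd] at h0
      simp at h0
      exact ⟨xs, by simp [h0]⟩

-- ===== VERDICT (by name: the statement is the Claim_ definition above) =====
theorem normal_function_spec : Claim_equal_normal_function := by
  intro function _
  unfold Spec_normal_function normal_function normal_function_alt
  simp only [PySem.Str.find_eq, show ("=" : String).toList = ['='] from rfl]
  set cs := function.toList with hcs
  have hA : (cs.foldl pvStepA (false, [])).2 = pvAfterEq cs := by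
    simpa using pvFoldA_false cs []
  by_cases h : PySem.Chars.find cs ['='] = -1
  · -- no '=' in the string: A appends nothing, B returns ''
    have hnm : '=' ∉ cs := by
      rw [PySem.Chars.find_eq_neg_one_iff] at h
      intro hmem
      obtain ⟨s, t, hst⟩ := List.append_of_mem hmem
      exact h ⟨s, t, by rw [hst]; simp⟩
    simp only [h]
    apply String.toList_injective
    simp [hA, pvAfterEq_of_not_mem cs hnm]
  · -- first '=' at index (find).toNat: A emits the suffix after it, B slices it
    have hge : 0 ≤ PySem.Chars.find cs ['='] := by
      have := PySem.Chars.neg_one_le_find cs ['=']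
      omega
    obtain ⟨hpre, hmin⟩ := PySem.Chars.find_spec hge
    set j : Nat := (PySem.Chars.find cs ['=']).toNat with hj
    have hjget : cs[j]? = some '=' := (pvSingleton_prefix_drop cs j).mp hpre
    have hjmin : ∀ i < j, cs[i]? ≠ some '=' := fun i hi hc =>
      hmin i hi ((pvSingleton_prefix_drop cs i).mpr hc)
    have hcast : PySem.Chars.find cs ['='] + 1 = ((j + 1 : Nat) : Int) := by
      rw [hj]; push_cast; omega
    rw [if_neg h]
    apply String.toList_injective
    rw [PySem.Str.toList_slice, hcast, ← hcs, PySem.Chars.slice_eq_listSlice,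
      PySem.List.slice_from_natCast]
    simp [hA, pvAfterEq_of_first cs j hjget hjmin]
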